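-- pv_equiv track=rewrite | github.com/HyeonBhinKim/BaekJoon | 프로그래머스/1/155652. 둘만의 암호/둘만의 암호.py | solution
-- ===== SOURCE A (Python) =====
-- def solution(s, skip, index):
--     # 알파벳 리스트에서 skip에 포함된 문자를 제외
--     alphabets = [chr(i) for i in range(97, 123) if chr(i) not in skip]
--
--     # 변환된 결과를 저장할 리스트
--     result = []
--
--     for char in s:
--         # 현재 문자의 위치를 찾음
--         current_pos = alphabets.index(char)
--         # index만큼 뒤의 위치를 계산
--         new_pos = (current_pos + index) % len(alphabets)
--         # 변환된 문자를 결과에 추가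
--         result.append(alphabets[new_pos])
--
--     # 리스트를 문자열로 변환하여 반환
--     return ''.join(result)
-- ===== SOURCE B (Python) =====
-- def solution(s, skip, index):
--     if not s:
--         return ""
--     # size of the cyclic ring of letters that survive the skip
--     n = sum(1 for o in range(97, 123) if chr(o) not in skip)
--     steps = index % n
--     out = []
--     for ch in s:
--         if not ('a' <= ch <= 'z') or ch in skip:
--             raise ValueError(f"{ch!r} is not in the cipher ring")
--         c = ch
--         for _ in range(steps):
--             # advance to the next letter on the a..z ring that is not skipped
--             c = 'a' if c == 'z' else chr(ord(c) + 1)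
--             while c in skip:
--                 c = 'a' if c == 'z' else chr(ord(c) + 1)
--         out.append(c)
--     return ''.join(out)
-- ===== Notes on version B (the rewrite author's own statement) =====
-- stated objective: alternative
-- what changed: Instead of building the filtered alphabet list and doing per-character .index plus modular indexing, B never materialises the alphabet: it counts the surviving letters once, reduces index modulo that count, and decodes each character by walking forward around the a..z ring with chr/ord arithmetic, skipping banned letters, that many steps.
import Mathlib
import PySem

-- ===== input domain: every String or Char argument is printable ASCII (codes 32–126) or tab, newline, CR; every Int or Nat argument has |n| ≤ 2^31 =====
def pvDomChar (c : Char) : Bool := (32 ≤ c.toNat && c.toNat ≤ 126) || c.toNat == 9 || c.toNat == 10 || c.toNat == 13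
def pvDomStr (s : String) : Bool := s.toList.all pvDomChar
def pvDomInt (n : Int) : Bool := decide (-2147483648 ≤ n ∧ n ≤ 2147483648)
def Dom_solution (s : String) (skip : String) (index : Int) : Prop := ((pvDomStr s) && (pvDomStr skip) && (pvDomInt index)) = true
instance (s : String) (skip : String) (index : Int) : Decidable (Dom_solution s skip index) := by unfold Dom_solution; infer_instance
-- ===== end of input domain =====

-- B never builds the filtered alphabet: it counts the surviving letters once, reduces index
-- modulo that count, and decodes each character by walking around the a..z ring step by step,
-- skipping banned letters — no .index scan and no lookup table; return values agree on Pre_.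

-- ===== PORT A =====
-- the list comprehension [chr(i) for i in range(97, 123) if chr(i) not in skip]
def pvAlphabets (skip : String) : List Char :=
  ((PySem.List.pyRange 97 123 1).map (fun i => Char.ofNat i.toNat)).filter
    (fun c => !(skip.toList.contains c))

def solution (s : String) (skip : String) (index : Int) : String :=
  let alphabets := pvAlphabets skip
  let result := s.toList.foldl (fun acc char =>
    match PySem.List.index? alphabets char with
    | none => acc   -- alphabets.index(char) raises ValueError; excluded by Pre_solution
    | some p =>
      let newPos := PySem.Int.mod ((p : Int) + index) (alphabets.length : Int)
      acc ++ [PySem.List.pyGetD alphabets newPos '?']) ([] : List Char)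
  String.ofList result

-- ===== PORT B =====
-- c = 'a' if c == 'z' else chr(ord(c) + 1)
def pvStep (c : Char) : Char := if c = 'z' then 'a' else Char.ofNat (c.toNat + 1)

-- the Python "advance, then `while c in skip: advance`" body, with fuel 26: whenever some
-- lowercase letter is outside skip (guaranteed under Pre_solution when it is ever called)
-- the loop stops within 26 advances, so fuel 26 is exact
def pvNext (skip : String) : Nat → Char → Char
  | 0, c => c
  | k+1, c =>
    let c' := pvStep c
    if skip.toList.contains c' then pvNext skip k c' else c'

def solution_alt (s : String) (skip : String) (index : Int) : String :=
  if s.toList = [] then ""    -- if not s: return ""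
  else
    -- n = sum(1 for o in range(97, 123) if chr(o) not in skip)
    let n : Int := (((PySem.List.pyRange 97 123 1).filter
        (fun o => !(skip.toList.contains (Char.ofNat o.toNat)))).length : Int)
    let steps := (PySem.Int.mod index n).toNat   -- steps = index % n
    String.ofList (s.toList.foldl (fun acc ch =>
      if !(97 ≤ ch.toNat && ch.toNat ≤ 122) || skip.toList.contains ch then  -- 'a' <= ch <= 'z'
        acc   -- raise ValueError: excluded by Pre_solution
      else
        acc ++ [(List.range steps).foldl (fun c _ => pvNext skip 26 c) ch]) [])

-- ===== PRECONDITION & SPEC =====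
-- the lowercase alphabet as a plain char list
def pvLower : List Char :=
  ['a','b','c','d','e','f','g','h','i','j','k','l','m',
   'n','o','p','q','r','s','t','u','v','w','x','y','z']

-- Pre_ excludes inputs where some character of s is not a lowercase letter outside skip:
-- there A raises ValueError (and B's walk would not terminate / misdecode).
def Pre_solution (s : String) (skip : String) (index : Int) : Prop :=
  (s.toList.all (fun c => pvLower.contains c && !(skip.toList.contains c))) = true
instance (s : String) (skip : String) (index : Int) : Decidable (Pre_solution s skip index) := by
  unfold Pre_solution; infer_instance
def pvWitness_solution : String × String × Int := ("abc", "x", 5)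

def Spec_solution (s : String) (skip : String) (index : Int) (out : String) : Prop :=
  out = solution_alt s skip index
instance (s : String) (skip : String) (index : Int) (out : String) : Decidable (Spec_solution s skip index out) := by
  unfold Spec_solution; infer_instance

-- ===== CLAIM (what is proved, stated in full; the proofs are below) =====
def Claim_equal_solution : Prop := ∀ (s : String) (skip : String) (index : Int),
  Dom_solution s skip index → Pre_solution s skip index →
  Spec_solution s skip index (solution s skip index)

-- ===== LEMMAS AND PROOFS =====

theorem pvAlphabets_eq (skip : String) :
    pvAlphabets skip = pvLower.filter (fun c => !(skip.toList.contains c)) := rfl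

theorem pvAlphabets_nodup (skip : String) : (pvAlphabets skip).Nodup := by
  rw [pvAlphabets_eq]; exact List.Nodup.filter _ (by decide)

theorem mem_pvAlphabets (skip : String) (c : Char) :
    c ∈ pvAlphabets skip ↔ c ∈ pvLower ∧ c ∉ skip.toList := by
  rw [pvAlphabets_eq]; simp [List.mem_filter]

-- the successive characters the walk visits, head first
def pvChain (k : Nat) (c : Char) : List Char :=
  match k with
  | 0 => []
  | k+1 => pvStep c :: pvChain k (pvStep c)

theorem pvNext_eq_head (skip : String) :
    ∀ (k : Nat) (c x : Char),
      ((pvChain k c).filter (fun c => !(skip.toList.contains c))).head? = some x →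
      pvNext skip k c = x := by
  intro k
  induction k with
  | zero => intro c x h; simp [pvChain] at h
  | succ k ih =>
    intro c x h
    simp only [pvChain, List.filter_cons] at h
    by_cases hc : skip.toList.contains (pvStep c)
    · rw [hc] at h; simp only [Bool.not_true, Bool.false_eq_true, if_false] at h
      have hm : pvStep c ∈ skip.toList := by simpa using hc
      simp only [pvNext, hm, if_true, List.contains_eq_mem, decide_eq_true_eq]
      exact ih (pvStep c) x h
    · rw [eq_false_of_ne_true hc] at h
      simp only [Bool.not_false, if_true, List.head?_cons, Option.some.injEq] at h
      have hm : pvStep c ∉ skip.toList := by simpa using hc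
      rw [← h]; simp [pvNext, hm]

-- the 26-step chain from the j-th letter is the rotation of the alphabet past j
theorem pvChain_rotation : ∀ j : Fin 26,
    pvChain 26 (pvLower.get j) = pvLower.drop (j.1+1) ++ pvLower.take (j.1+1) := by
  decide

theorem index?_getElem_of_nodup {α : Type} [BEq α] [LawfulBEq α] (l : List α)
    (hnd : l.Nodup) (i : Nat) (hi : i < l.length) :
    PySem.List.index? l l[i] = some i := by
  rw [PySem.List.index?_eq_some_iff]
  refine ⟨l.take i, l.drop (i+1), ?_, ?_, ?_⟩
  · rw [List.getElem_cons_drop hi, List.take_append_drop]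
  · simp [List.length_take, Nat.min_eq_left (Nat.le_of_lt hi)]
  · intro hmem
    have hdisj := List.disjoint_take_drop (m := i) (n := i) hnd (Nat.le_refl i)
    exact hdisj hmem (by rw [← List.getElem_cons_drop hi]; exact List.mem_cons_self ..)

-- one ring step from the i-th surviving letter lands on the (i+1 mod n)-th
theorem pvNext_step (skip : String) (c : Char) (i : Nat)
    (hidx : PySem.List.index? (pvAlphabets skip) c = some i) :
    ∃ hi : i < (pvAlphabets skip).length,
      pvNext skip 26 c =
        (pvAlphabets skip)[(i+1) % (pvAlphabets skip).length]'
          (Nat.mod_lt _ (by omega)) := by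
  obtain ⟨hi, hci, -⟩ := PySem.List.getElem_of_index?_eq_some hidx
  refine ⟨hi, ?_⟩
  have hcF : c ∈ pvAlphabets skip := hci ▸ List.getElem_mem hi
  have hcl : c ∈ pvLower ∧ (!(skip.toList.contains c)) = true := by
    have h := hcF; rw [pvAlphabets_eq] at h
    exact ⟨(List.mem_filter.mp h).1, (List.mem_filter.mp h).2⟩
  have hpc : c ∉ skip.toList := by simpa using hcl.2
  obtain ⟨j, hj, hcj⟩ := List.mem_iff_getElem.mp hcl.1
  -- the 26-element chain from c is the rotation of pvLower past position j
  have hrot : pvChain 26 c = pvLower.drop (j+1) ++ pvLower.take (j+1) := by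
    have h := pvChain_rotation ⟨j, hj⟩
    simpa [List.get_eq_getElem, hcj] using h
  have hnd : pvLower.Nodup := by decide
  have hsplit : pvAlphabets skip =
      (pvLower.take (j+1)).filter (fun c => !(skip.toList.contains c)) ++
      (pvLower.drop (j+1)).filter (fun c => !(skip.toList.contains c)) := by
    rw [pvAlphabets_eq, ← List.filter_append, List.take_append_drop]
  have htake : pvLower.take (j+1) = pvLower.take j ++ [c] := by
    rw [List.take_add_one]; simp [List.getElem?_eq_getElem hj, hcj]
  have hT : (pvLower.take (j+1)).filter (fun c => !(skip.toList.contains c)) =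
      (pvLower.take j).filter (fun c => !(skip.toList.contains c)) ++ [c] := by
    rw [htake, List.filter_append]; simp [hpc]
  have hcd : c ∈ pvLower.drop j := by
    rw [← List.getElem_cons_drop hj, hcj]; exact List.mem_cons_self ..
  have hcnt : c ∉ pvLower.take j :=
    fun hmem => (List.disjoint_take_drop hnd (Nat.le_refl j)) hmem hcd
  have hcnt' : c ∉ (pvLower.take j).filter (fun c => !(skip.toList.contains c)) :=
    fun hmem => hcnt (List.mem_of_mem_filter hmem)
  -- position of c inside the filtered alphabet is the length of the filtered prefix
  have hidx2 : PySem.List.index? (pvAlphabets skip) c =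
      some ((pvLower.take j).filter (fun c => !(skip.toList.contains c))).length := by
    conv_lhs => rw [hsplit, hT]
    rw [PySem.List.index?_append_of_mem _ (by simp),
        PySem.List.index?_append_singleton_self _ c hcnt']
  have hiT : ((pvLower.take j).filter (fun c => !(skip.toList.contains c))).length = i := by
    have h := hidx.symm.trans hidx2
    exact (Option.some.injEq .. ▸ h).symm
  have hTlen : ((pvLower.take (j+1)).filter (fun c => !(skip.toList.contains c))).length = i + 1 := by
    rw [hT, List.length_append, hiT]; rfl
  have hlen : (pvAlphabets skip).length =
      (i+1) + ((pvLower.drop (j+1)).filter (fun c => !(skip.toList.contains c))).length := by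
    rw [hsplit, List.length_append, hTlen]
  have hfs : (pvChain 26 c).filter (fun c => !(skip.toList.contains c)) =
      ((pvLower.drop (j+1)).filter (fun c => !(skip.toList.contains c))) ++
      ((pvLower.take (j+1)).filter (fun c => !(skip.toList.contains c))) := by
    rw [hrot, List.filter_append]
  apply pvNext_eq_head
  rw [hfs]
  cases hD : (pvLower.drop (j+1)).filter (fun c => !(skip.toList.contains c)) with
  | nil =>
      have hn : (pvAlphabets skip).length = i+1 := by rw [hlen, hD]; rfl
      have hmod : (i+1) % (pvAlphabets skip).length = 0 := by rw [hn]; simp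
      have hFT : pvAlphabets skip =
          (pvLower.take (j+1)).filter (fun c => !(skip.toList.contains c)) := by
        rw [hsplit, hD, List.append_nil]
      rw [List.nil_append, ← hFT, List.head?_eq_getElem?]
      rw [List.getElem?_eq_getElem (by omega)]
      simp only [hmod]
  | cons d D' =>
      have hlt : i+1 < (pvAlphabets skip).length := by rw [hlen, hD]; simp
      have hmod : (i+1) % (pvAlphabets skip).length = i+1 := Nat.mod_eq_of_lt hlt
      simp only [List.cons_append, List.head?_cons, Option.some.injEq]
      have hgoal : (pvAlphabets skip)[i+1]'hlt = d := by
        rw [List.getElem_eq_iff hlt]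
        conv_lhs => rw [hsplit]
        rw [List.getElem?_append_right (by omega)]
        rw [hTlen, hD]
        simp
      rw [← hgoal]
      congr 1
      exact hmod.symm

theorem pvShift_iter (skip : String) (t i : Nat) (hi : i < (pvAlphabets skip).length) :
    (List.range t).foldl (fun c _ => pvNext skip 26 c) (pvAlphabets skip)[i] =
      (pvAlphabets skip)[(i+t) % (pvAlphabets skip).length]'
        (Nat.mod_lt _ (by omega)) := by
  induction t with
  | zero => simp [Nat.mod_eq_of_lt hi]
  | succ t ih =>
    rw [List.range_succ, List.foldl_append, ih]
    simp only [List.foldl_cons, List.foldl_nil]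
    obtain ⟨hlt2, hstep⟩ := pvNext_step skip
      ((pvAlphabets skip)[(i+t) % (pvAlphabets skip).length]'(Nat.mod_lt _ (by omega)))
      ((i+t) % (pvAlphabets skip).length)
      (index?_getElem_of_nodup _ (pvAlphabets_nodup skip) _ (Nat.mod_lt _ (by omega)))
    rw [hstep]
    congr 1
    rw [Nat.mod_add_mod, Nat.add_assoc]

theorem pvCount_eq (skip : String) :
    (((PySem.List.pyRange 97 123 1).filter
        (fun o => !(skip.toList.contains (Char.ofNat o.toNat)))).length : Int)
      = ((pvAlphabets skip).length : Int) := by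
  have h : ((PySem.List.pyRange 97 123 1).map (fun i => Char.ofNat i.toNat)).filter
        (fun c => !(skip.toList.contains c))
      = ((PySem.List.pyRange 97 123 1).filter
          (fun o => !(skip.toList.contains (Char.ofNat o.toNat)))).map
          (fun i => Char.ofNat i.toNat) := by
    rw [List.filter_map]; rfl
  unfold pvAlphabets
  rw [h, List.length_map]

-- ===== VERDICT (by name: the statement is the Claim_ definition above) =====
theorem pv_point (skip : String) (index : Int) (c : Char) (i : Nat)
    (hidx : PySem.List.index? (pvAlphabets skip) c = some i) :
    PySem.List.pyGetD (pvAlphabets skip)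
        (PySem.Int.mod ((i : Int) + index) ((pvAlphabets skip).length : Int)) '?'
    = (List.range (PySem.Int.mod index ((pvAlphabets skip).length : Int)).toNat).foldl
        (fun c _ => pvNext skip 26 c) c := by
  obtain ⟨hi, hci, -⟩ := PySem.List.getElem_of_index?_eq_some hidx
  have hn : 0 < (pvAlphabets skip).length := by omega
  have hnI : (0 : Int) < ((pvAlphabets skip).length : Int) := by exact_mod_cast hn
  have hB : (List.range (PySem.Int.mod index ((pvAlphabets skip).length : Int)).toNat).foldl
      (fun c _ => pvNext skip 26 c) c =
      (pvAlphabets skip)[(i + (PySem.Int.mod index ((pvAlphabets skip).length : Int)).toNat)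
          % (pvAlphabets skip).length]'(Nat.mod_lt _ (by omega)) := by
    conv_lhs => rw [← hci]
    exact pvShift_iter skip _ i hi
  rw [hB]
  have hmm : PySem.Int.mod index ((pvAlphabets skip).length : Int)
      = index % ((pvAlphabets skip).length : Int) :=
    PySem.Int.mod_eq_emod_of_pos hnI
  have hmnn : 0 ≤ index % ((pvAlphabets skip).length : Int) := Int.emod_nonneg _ (by omega)
  -- A's modular index equals B's walked distance, as naturals
  have hA : PySem.Int.mod ((i : Int) + index) ((pvAlphabets skip).length : Int)
      = ((i + (PySem.Int.mod index ((pvAlphabets skip).length : Int)).toNat)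
          % (pvAlphabets skip).length : Nat) := by
    rw [PySem.Int.mod_eq_emod_of_pos hnI, hmm]
    have ht : ((index % ((pvAlphabets skip).length : Int)).toNat : Int)
        = index % ((pvAlphabets skip).length : Int) := Int.toNat_of_nonneg hmnn
    push_cast
    rw [ht]
    have hdecomp : (i : Int) + index
        = ((i : Int) + index % ((pvAlphabets skip).length : Int))
          + (index / ((pvAlphabets skip).length : Int)) * ((pvAlphabets skip).length : Int) := by
      have h := Int.emod_add_ediv_mul index ((pvAlphabets skip).length : Int)
      linarith
    conv_lhs => rw [hdecomp]
    rw [Int.add_mul_emod_self_right]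
  rw [hA, PySem.List.pyGetD_natCast]
  exact List.getD_eq_getElem _ _ _

set_option maxRecDepth 4096 in
theorem solution_spec : Claim_equal_solution := by
  intro s skip index _ hpre
  unfold Spec_solution solution solution_alt
  have hmem : ∀ c ∈ s.toList, c ∈ pvAlphabets skip := by
    intro c hc
    rw [mem_pvAlphabets]
    have h := List.all_eq_true.mp hpre c hc
    simpa using h
  by_cases hS : s.toList = []
  · rw [if_pos hS, hS]
    rfl
  · rw [if_neg hS]
    simp only [pvCount_eq]
    congr 1
    apply PySem.List.foldl_congr_mem
    intro acc x hx
    obtain ⟨i, hidx⟩ := Option.isSome_iff_exists.mp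
      ((PySem.List.index?_isSome_iff (xs := pvAlphabets skip) (v := x)).mpr (hmem x hx))
    have hxl : x ∈ pvLower ∧ x ∉ skip.toList := (mem_pvAlphabets skip x).mp (hmem x hx)
    have hrange : (97 ≤ x.toNat && x.toNat ≤ 122) = true := by
      have hall : pvLower.all (fun y => 97 ≤ y.toNat && y.toNat ≤ 122) = true := by decide
      have hall' := List.all_eq_true.mp hall
      exact hall' x hxl.1
    have hcond : (!(97 ≤ x.toNat && x.toNat ≤ 122) || skip.toList.contains x) = false := by
      simp [hrange, hxl.2]
    simp only [hidx, hcond, Bool.false_eq_true, if_false]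
    rw [pv_point skip index x i hidx]
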